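-- pv_equiv track=rewrite | github.com/koreanwglasses/py-algorithms | Mathes/mathes3.py | telephone
-- ===== SOURCE A (Python) =====
-- def telephone(n):
--     if n < 2:
--         return 1
--     a = 1
--     b = 1
--     for k in range(1, n):
--         c = b + k * a
--         a = b
--         b = c
--     return b
-- ===== SOURCE B (Python) =====
-- def telephone(n):
--     if n < 2:
--         return 1
--     # Closed sum T(n) = sum over k of C(n, 2k) * (2k-1)!! : choose the 2k
--     # points that lie on 2-cycles, then count perfect matchings on them.
--     # t carries the current term C(n, 2k) * (2k-1)!!; the ratio of
--     # consecutive terms is (n-2k)(n-2k-1)/(2k+2), an exact division.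
--     total = 0
--     t = 1
--     for k in range(n // 2 + 1):
--         total += t
--         t = t * (n - 2 * k) * (n - 2 * k - 1) // (2 * k + 2)
--     return total
-- ===== Notes on version B (the rewrite author's own statement) =====
-- stated objective: alternative
-- what changed: Replaces A's two-term forward recurrence by the closed combinatorial sum T(n) = sum over k of C(n,2k)*(2k-1)!!, accumulating each term from the previous one via the exact ratio (n-2k)(n-2k-1)/(2k+2) in a single pass over k = 0..n//2.
import Mathlib
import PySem

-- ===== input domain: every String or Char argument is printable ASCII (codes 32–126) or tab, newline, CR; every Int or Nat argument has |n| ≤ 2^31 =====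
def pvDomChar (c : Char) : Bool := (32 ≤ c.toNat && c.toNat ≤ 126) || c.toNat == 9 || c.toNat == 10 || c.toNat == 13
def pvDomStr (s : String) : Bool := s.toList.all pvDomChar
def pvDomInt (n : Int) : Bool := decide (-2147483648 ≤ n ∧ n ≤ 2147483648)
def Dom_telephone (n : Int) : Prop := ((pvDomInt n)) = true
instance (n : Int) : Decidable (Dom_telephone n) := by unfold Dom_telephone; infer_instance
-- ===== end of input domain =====

-- B replaces A's two-term forward recurrence by the closed sum T(n) = Σ_k C(n,2k)·(2k-1)!!,
-- accumulating each term from the previous one by an exact ratio (objective: alternative).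

-- ===== PORT A =====
def telephone (n : Int) : Int :=
  if n < 2 then 1
  else
    ((PySem.List.pyRange 1 n 1).foldl
      (fun (ab : Int × Int) k => (ab.2, ab.2 + k * ab.1)) (1, 1)).2

-- ===== PORT B =====
def telephone_alt (n : Int) : Int :=
  if n < 2 then 1
  else
    (((PySem.List.pyRange 0 (PySem.Int.floordiv n 2 + 1) 1).foldl
      (fun (s : Int × Int) k =>
        (s.1 + s.2,
         PySem.Int.floordiv (s.2 * (n - 2 * k) * (n - 2 * k - 1)) (2 * k + 2)))
      (0, 1))).1

-- ===== PRECONDITION & SPEC =====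
def Spec_telephone (n : Int) (out : Int) : Prop := out = telephone_alt n
instance (n : Int) (out : Int) : Decidable (Spec_telephone n out) := by unfold Spec_telephone; infer_instance

-- ===== CLAIM (what is proved, stated in full; the proofs are below) =====
def Claim_equal_telephone : Prop := ∀ (n : Int), Dom_telephone n → Spec_telephone n (telephone n)

-- ===== LEMMAS AND PROOFS =====

-- the involution numbers (A's recurrence)
def pvInv : Nat → Nat
  | 0 => 1
  | 1 => 1
  | n + 2 => pvInv (n + 1) + (n + 1) * pvInv n

-- (2k-1)!! : number of perfect matchings on 2k points
def pvDf : Nat → Nat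
  | 0 => 1
  | k + 1 => pvDf k * (2 * k + 1)

-- the closed sum with the full (zero-padded) range
def pvT (N : Nat) : Nat := ∑ k ∈ Finset.range (N + 1), Nat.choose N (2 * k) * pvDf k

lemma foldA (m : Nat) :
    (PySem.List.pyRange 1 ((m : Int) + 1) 1).foldl
      (fun (ab : Int × Int) k => (ab.2, ab.2 + k * ab.1)) (1, 1)
      = ((pvInv m : Int), (pvInv (m + 1) : Int)) := by
  induction m with
  | zero => simp [PySem.List.pyRange_one_eq_nil (by norm_num : (1:Int) ≥ 1), pvInv]
  | succ m ih =>
    rw [show ((m + 1 : Nat) : Int) + 1 = ((m : Int) + 1) + 1 by push_cast; ring,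
        PySem.List.pyRange_one_succ_right (by omega), List.foldl_append, ih]
    simp only [List.foldl_cons, List.foldl_nil, Prod.mk.injEq]
    refine ⟨by norm_cast, ?_⟩
    rw [show pvInv (m + 1 + 1) = pvInv (m + 1) + (m + 1) * pvInv m from rfl]
    push_cast; ring

lemma term_step (N k : Nat) (hk : 2 * k ≤ N) :
    PySem.Int.floordiv
        (((Nat.choose N (2 * k) * pvDf k : Nat) : Int) * ((N : Int) - 2 * (k : Int)) * ((N : Int) - 2 * (k : Int) - 1))
        (2 * (k : Int) + 2)
      = ((Nat.choose N (2 * k + 2) * pvDf (k + 1) : Nat) : Int) := by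
  have hd : (0 : Int) < 2 * (k : Int) + 2 := by positivity
  rw [PySem.Int.floordiv_eq_ediv_of_pos hd]
  by_cases h : 2 * k + 2 ≤ N
  · have h1 : Nat.choose N (2 * k) * (N - 2 * k) = Nat.choose N (2 * k + 1) * (2 * k + 1) :=
      (Nat.choose_succ_right_eq N (2 * k)).symm
    have h2 : Nat.choose N (2 * k + 1) * (N - (2 * k + 1)) = Nat.choose N (2 * k + 2) * (2 * k + 2) :=
      (Nat.choose_succ_right_eq N (2 * k + 1)).symm
    have key : Nat.choose N (2 * k) * pvDf k * (N - 2 * k) * (N - 2 * k - 1)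
        = Nat.choose N (2 * k + 2) * pvDf (k + 1) * (2 * k + 2) := by
      have hdf : pvDf (k + 1) = pvDf k * (2 * k + 1) := rfl
      have hsub : N - 2 * k - 1 = N - (2 * k + 1) := by omega
      calc Nat.choose N (2 * k) * pvDf k * (N - 2 * k) * (N - 2 * k - 1)
          = pvDf k * (Nat.choose N (2 * k) * (N - 2 * k)) * (N - 2 * k - 1) := by ring
        _ = pvDf k * (Nat.choose N (2 * k + 1) * (2 * k + 1)) * (N - 2 * k - 1) := by rw [h1]
        _ = (pvDf k * (2 * k + 1)) * (Nat.choose N (2 * k + 1) * (N - (2 * k + 1))) := by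
            rw [hsub]; ring
        _ = (pvDf k * (2 * k + 1)) * (Nat.choose N (2 * k + 2) * (2 * k + 2)) := by rw [h2]
        _ = Nat.choose N (2 * k + 2) * pvDf (k + 1) * (2 * k + 2) := by rw [hdf]; ring
    have hcast : ((Nat.choose N (2 * k) * pvDf k : Nat) : Int) * ((N : Int) - 2 * (k : Int))
          * ((N : Int) - 2 * (k : Int) - 1)
        = ((Nat.choose N (2 * k + 2) * pvDf (k + 1) : Nat) : Int) * (2 * (k : Int) + 2) := by
      have e1 : ((N : Int) - 2 * (k : Int)) = ((N - 2 * k : Nat) : Int) := by push_cast; omega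
      have e2 : ((N : Int) - 2 * (k : Int) - 1) = ((N - 2 * k - 1 : Nat) : Int) := by push_cast; omega
      rw [e2, e1]
      calc ((Nat.choose N (2 * k) * pvDf k : Nat) : Int) * ((N - 2 * k : Nat) : Int) * ((N - 2 * k - 1 : Nat) : Int)
          = ((Nat.choose N (2 * k) * pvDf k * (N - 2 * k) * (N - 2 * k - 1) : Nat) : Int) := by
            push_cast; ring
        _ = ((Nat.choose N (2 * k + 2) * pvDf (k + 1) * (2 * k + 2) : Nat) : Int) := by rw [key]
        _ = ((Nat.choose N (2 * k + 2) * pvDf (k + 1) : Nat) : Int) * (2 * (k : Int) + 2) := by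
            push_cast; ring
    rw [hcast, Int.mul_ediv_cancel _ (by omega)]
  · have hC : Nat.choose N (2 * k + 2) = 0 := Nat.choose_eq_zero_of_lt (by omega)
    have h0 : ((Nat.choose N (2 * k) * pvDf k : Nat) : Int) * ((N : Int) - 2 * (k : Int))
          * ((N : Int) - 2 * (k : Int) - 1) = 0 := by
      have : (N : Int) - 2 * (k : Int) = 0 ∨ (N : Int) - 2 * (k : Int) - 1 = 0 := by omega
      rcases this with h' | h' <;> rw [h'] <;> ring
    rw [h0, Int.zero_ediv, hC, Nat.zero_mul, Nat.cast_zero]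

lemma foldSum (N K : Nat) (hK : ∀ k, k < K → 2 * k ≤ N) :
    (List.range K).foldl
      (fun (s : Int × Int) (k : Nat) =>
        (s.1 + s.2,
         PySem.Int.floordiv (s.2 * ((N : Int) - 2 * (k : Int)) * ((N : Int) - 2 * (k : Int) - 1))
           (2 * (k : Int) + 2)))
      (0, 1)
      = (((∑ j ∈ Finset.range K, Nat.choose N (2 * j) * pvDf j : Nat) : Int),
         ((Nat.choose N (2 * K) * pvDf K : Nat) : Int)) := by
  induction K with
  | zero => simp [pvDf]
  | succ K ih =>
    rw [List.range_succ, List.foldl_append, ih (fun k hk => hK k (by omega))]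
    simp only [List.foldl_cons, List.foldl_nil, Prod.mk.injEq]
    refine ⟨by rw [Finset.sum_range_succ]; push_cast; ring, ?_⟩
    exact term_step N K (hK K (by omega))

lemma pvT_pad (N M : Nat) (hM : N / 2 ≤ M) (hMN : M ≤ N) :
    ∑ k ∈ Finset.range (M + 1), Nat.choose N (2 * k) * pvDf k = pvT N := by
  unfold pvT
  refine Finset.sum_subset (fun x hx => by simp only [Finset.mem_range] at hx ⊢; omega) ?_
  intro k hk1 hk
  have hk' : M + 1 ≤ k := by simpa using hk
  have hN : N < 2 * k := by omega
  rw [Nat.choose_eq_zero_of_lt hN, Nat.zero_mul]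

lemma pvT_succ_succ (N : Nat) : pvT (N + 2) = pvT (N + 1) + (N + 1) * pvT N := by
  have h1 : pvT (N + 2)
      = (∑ k ∈ Finset.range (N + 2), Nat.choose (N + 2) (2 * (k + 1)) * pvDf (k + 1)) + 1 := by
    unfold pvT; rw [Finset.sum_range_succ']; norm_num [show pvDf 0 = 1 from rfl]
  have hsplit : ∀ k : Nat, Nat.choose (N + 2) (2 * (k + 1))
      = Nat.choose (N + 1) (2 * k + 1) + Nat.choose (N + 1) (2 * k + 2) := by
    intro k
    have h2k : 2 * (k + 1) = (2 * k + 1) + 1 := by ring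
    rw [h2k, Nat.choose_succ_succ]
  have h2a : (∑ k ∈ Finset.range (N + 2), Nat.choose (N + 2) (2 * (k + 1)) * pvDf (k + 1))
      = (∑ k ∈ Finset.range (N + 2), Nat.choose (N + 1) (2 * k + 1) * pvDf (k + 1))
        + (∑ k ∈ Finset.range (N + 2), Nat.choose (N + 1) (2 * k + 2) * pvDf (k + 1)) := by
    rw [← Finset.sum_add_distrib]
    exact Finset.sum_congr rfl (fun k _ => by rw [hsplit k, Nat.add_mul])
  have hA2 : (∑ k ∈ Finset.range (N + 2), Nat.choose (N + 1) (2 * k + 2) * pvDf (k + 1)) + 1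
      = pvT (N + 1) := by
    rw [Finset.sum_range_succ, Nat.choose_eq_zero_of_lt (by omega), Nat.zero_mul, Nat.add_zero]
    unfold pvT
    conv_rhs => rw [Finset.sum_range_succ']
    have hcg : ∀ k ∈ Finset.range (N + 1), Nat.choose (N + 1) (2 * (k + 1)) * pvDf (k + 1)
        = Nat.choose (N + 1) (2 * k + 2) * pvDf (k + 1) := by
      intro k _
      have h22 : 2 * (k + 1) = 2 * k + 2 := by ring
      rw [h22]
    rw [Finset.sum_congr rfl hcg]
    norm_num [show pvDf 0 = 1 from rfl]
  have hA1 : (∑ k ∈ Finset.range (N + 2), Nat.choose (N + 1) (2 * k + 1) * pvDf (k + 1))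
      = (N + 1) * pvT N := by
    have hterm : ∀ k ∈ Finset.range (N + 2), Nat.choose (N + 1) (2 * k + 1) * pvDf (k + 1)
        = (N + 1) * (Nat.choose N (2 * k) * pvDf k) := by
      intro k _
      have hmc : Nat.choose (N + 1) (2 * k + 1) * (2 * k + 1) = (N + 1) * Nat.choose N (2 * k) := by
        have h := Nat.succ_mul_choose_eq N (2 * k)
        simpa [Nat.succ_eq_add_one] using h.symm
      calc Nat.choose (N + 1) (2 * k + 1) * pvDf (k + 1)
          = Nat.choose (N + 1) (2 * k + 1) * (pvDf k * (2 * k + 1)) := by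
            rw [show pvDf (k + 1) = pvDf k * (2 * k + 1) from rfl]
        _ = (Nat.choose (N + 1) (2 * k + 1) * (2 * k + 1)) * pvDf k := by ring
        _ = ((N + 1) * Nat.choose N (2 * k)) * pvDf k := by rw [hmc]
        _ = (N + 1) * (Nat.choose N (2 * k) * pvDf k) := by ring
    rw [Finset.sum_congr rfl hterm, ← Finset.mul_sum]
    congr 1
    unfold pvT
    rw [Finset.sum_range_succ, Nat.choose_eq_zero_of_lt (by omega), Nat.zero_mul, Nat.add_zero]
  rw [h1, h2a, hA1, hA2.symm]
  ring

lemma pvT_eq_inv (N : Nat) : pvT N = pvInv N := by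
  induction N using Nat.strong_induction_on with
  | _ N ih =>
    match N with
    | 0 => decide
    | 1 => decide
    | N + 2 =>
      rw [pvT_succ_succ, ih (N + 1) (by omega), ih N (by omega), pvInv]

lemma telephone_eq (n : Int) (hn : 2 ≤ n) : telephone n = (pvInv n.toNat : Int) := by
  unfold telephone
  rw [if_neg (by omega)]
  obtain ⟨m, hm⟩ : ∃ m : Nat, n = (m : Int) + 1 := ⟨(n - 1).toNat, by omega⟩
  subst hm
  rw [foldA]
  rw [show ((m : Int) + 1).toNat = m + 1 by omega]

lemma telephone_alt_eq (n : Int) (hn : 2 ≤ n) : telephone_alt n = (pvT n.toNat : Int) := by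
  unfold telephone_alt
  rw [if_neg (by omega)]
  obtain ⟨N, hN⟩ : ∃ N : Nat, n = (N : Int) := ⟨n.toNat, by omega⟩
  subst hN
  rw [show (PySem.Int.floordiv (N : Int) 2) = ((N / 2 : Nat) : Int) from
        PySem.Int.floordiv_natCast N 2]
  rw [PySem.List.pyRange_one 0 (((N / 2 : Nat) : Int) + 1)]
  simp only [List.foldl_map, zero_add]
  rw [show (((N / 2 : Nat) : Int) + 1 - 0).toNat = N / 2 + 1 by omega]
  rw [foldSum N (N / 2 + 1) (fun k hk => by omega)]
  simp only [Int.toNat_natCast]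
  rw [pvT_pad N (N / 2) (le_refl _) (by omega)]

-- ===== VERDICT (by name: the statement is the Claim_ definition above) =====
theorem telephone_spec : Claim_equal_telephone := by
  intro n _
  unfold Spec_telephone
  by_cases hn : n < 2
  · unfold telephone telephone_alt
    rw [if_pos hn, if_pos hn]
  · rw [telephone_eq n (by omega), telephone_alt_eq n (by omega), pvT_eq_inv]
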